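-- pv_equiv track=rewrite | github.com/pepcko/various_problem_sets | softuni_psets/take_skip_rope.py | take_skip
-- ===== SOURCE A (Python) =====
-- def take_skip(string) -> str:
--
--     # we take only the numbers from the provided string
--     num_list = [int(i) for i in string if i.isdecimal()]
--
--     # we take only the letters from the provided string
--     letter_list = "".join([i for i in string if not i.isdecimal()])
--
--     # we make two list the one with the numbers in every even index
--     # and one with the odd index values
--     take_list = [num_list[i] for i in range(len(num_list)) if i % 2 == 0]
--     skip_list = [num_list[i] for i in range(len(num_list)) if i % 2 != 0]
--
--     # this is going to be our new string
--     taken_string = ""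
--
--     for index in range(len(take_list)):
--
--         # we take every string with every value in the take list
--         # and we skip with the values from the skip list
--         taken_string += letter_list[:take_list[index]]
--         letter_list = letter_list[take_list[index] + skip_list[index]:]
--
--     return taken_string
-- ===== SOURCE B (Python) =====
-- def take_skip(string) -> str:
--     # Single pass split, then one pointer over the letters; builds parts and joins once.
--     letters = [c for c in string if not c.isdecimal()]
--     nums = [int(c) for c in string if c.isdecimal()]
--     parts = []
--     pos = 0
--     i = 1
--     while i < len(nums):
--         take, skip = nums[i - 1], nums[i]
--         parts.append(''.join(letters[pos:pos + take]))
--         pos += take + skip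
--         i += 2
--     return ''.join(parts)
-- ===== Notes on version B (the rewrite author's own statement) =====
-- stated objective: alternative
-- what changed: B replaces A's repeated string concatenation and re-slicing of the whole remaining letter string per digit pair with a single advancing pointer into the letter list, collecting slice parts and joining once.
import Mathlib
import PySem

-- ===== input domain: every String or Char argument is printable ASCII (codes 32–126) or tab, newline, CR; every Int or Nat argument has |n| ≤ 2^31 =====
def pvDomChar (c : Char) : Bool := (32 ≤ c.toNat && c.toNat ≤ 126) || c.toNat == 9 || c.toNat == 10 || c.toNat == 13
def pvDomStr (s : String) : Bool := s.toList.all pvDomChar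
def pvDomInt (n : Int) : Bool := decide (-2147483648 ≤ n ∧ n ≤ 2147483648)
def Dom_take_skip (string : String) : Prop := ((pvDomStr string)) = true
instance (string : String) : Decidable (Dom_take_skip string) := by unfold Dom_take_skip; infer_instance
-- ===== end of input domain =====

-- B collects letter slices via one advancing pointer and joins once, instead of A's
-- repeated whole-remainder re-slicing and string concatenation.

-- int(c) for a single decimal ASCII char (exact on Dom, where isdecimal = '0'..'9')
def pvDigitVal (c : Char) : Int := (c.toNat : Int) - 48

-- ===== PORT A =====
def take_skip (string : String) : String :=
  let num_list : List Int := (string.toList.filter Char.isDigit).map pvDigitVal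
  let letter_list : List Char := string.toList.filter (fun c => !c.isDigit)
  let take_list : List Int :=
    ((List.range num_list.length).filter (fun i => i % 2 == 0)).map (fun i => num_list.getD i 0)
  let skip_list : List Int :=
    ((List.range num_list.length).filter (fun i => i % 2 != 0)).map (fun i => num_list.getD i 0)
  -- the loop: state = (taken_string, current letter_list); slice values are digits (0..9),
  -- so letter_list[:t] = take t.toNat and letter_list[t+s:] = drop (t+s).toNat, exactly Python's clamping slices.
  -- skip_list.getD is only in range under Pre_ (even digit count); Python raises IndexError otherwise.
  let res := (List.range take_list.length).foldl
    (fun (st : List Char × List Char) index =>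
      (st.1 ++ st.2.take (take_list.getD index 0).toNat,
       st.2.drop ((take_list.getD index 0) + (skip_list.getD index 0)).toNat))
    ([], letter_list)
  String.mk res.1

-- ===== PORT B =====
-- B's while loop consumes nums two at a time; ported as structural recursion on the number list.
def pvGoB (letters : List Char) : List Int → Nat → List (List Char)
  | t :: s :: rest, pos =>
      ((letters.drop pos).take t.toNat) :: pvGoB letters rest (pos + (t + s).toNat)
  | _, _ => []

def take_skip_alt (string : String) : String :=
  let letters : List Char := string.toList.filter (fun c => !c.isDigit)
  let nums : List Int := (string.toList.filter Char.isDigit).map pvDigitVal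
  String.mk (pvGoB letters nums 0).flatten

-- ===== PRECONDITION & SPEC =====
-- Pre_ excludes exactly the inputs where A raises IndexError: an odd number of decimal digits in the string.
def Pre_take_skip (string : String) : Prop :=
  (string.toList.filter Char.isDigit).length % 2 = 0
instance (string : String) : Decidable (Pre_take_skip string) := by unfold Pre_take_skip; infer_instance

def pvWitness_take_skip : String := "ab3cdef1g2hi0"

def Spec_take_skip (string : String) (out : String) : Prop := out = take_skip_alt string
instance (string : String) (out : String) : Decidable (Spec_take_skip string out) := by unfold Spec_take_skip; infer_instance

-- ===== CLAIM (what is proved, stated in full; the proofs are below) =====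
def Claim_equal_take_skip : Prop := ∀ (string : String), Dom_take_skip string → Pre_take_skip string → Spec_take_skip string (take_skip string)

-- ===== LEMMAS AND PROOFS =====

-- the even-index / odd-index sublists A builds via range+filter
def pvEvens : List Int → List Int
  | [] => []
  | [a] => [a]
  | a :: _ :: r => a :: pvEvens r

def pvOdds : List Int → List Int
  | [] => []
  | [_] => []
  | _ :: b :: r => b :: pvOdds r

lemma pvEvens_eq (l : List Int) :
    ((List.range l.length).filter (fun i => i % 2 == 0)).map (fun i => l.getD i 0) = pvEvens l := by
  induction l using pvEvens.induct with
  | case1 => simp [pvEvens]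
  | case2 a => simp [pvEvens]
  | case3 a b r ih =>
    simp only [List.length_cons, List.range_succ_eq_map, List.map_cons, List.filter_cons,
      List.filter_map, List.map_map]
    simp only [Function.comp_def, Nat.succ_eq_add_one]
    norm_num
    have h1 : (fun i : Nat => (i + 1 + 1) % 2 == 0) = (fun i : Nat => i % 2 == 0) := by
      funext i; rcases Nat.mod_two_eq_zero_or_one i with h | h <;> simp [Nat.add_mod, h]
    rw [h1]
    simpa [pvEvens] using ih

lemma pvOdds_eq (l : List Int) :
    ((List.range l.length).filter (fun i => i % 2 != 0)).map (fun i => l.getD i 0) = pvOdds l := by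
  induction l using pvOdds.induct with
  | case1 => simp [pvOdds]
  | case2 a => simp [pvOdds]
  | case3 a b r ih =>
    simp only [List.length_cons, List.range_succ_eq_map, List.map_cons, List.filter_cons,
      List.filter_map, List.map_map]
    simp only [Function.comp_def, Nat.succ_eq_add_one]
    norm_num
    have h1 : (fun i : Nat => (i + 1 + 1) % 2 == 1) = (fun i : Nat => i % 2 != 0) := by
      funext i; rcases Nat.mod_two_eq_zero_or_one i with h | h <;> simp [Nat.add_mod, h]
    rw [h1]
    simpa [pvOdds] using ih

lemma pvLen_eq (l : List Int) (h : l.length % 2 = 0) : (pvEvens l).length = (pvOdds l).length := by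
  induction l using pvEvens.induct with
  | case1 => simp [pvEvens, pvOdds]
  | case2 a => simp at h
  | case3 a b r ih =>
    simp only [List.length_cons] at h
    simp [pvEvens, pvOdds, ih (by omega)]

-- A's loop, restated over the list of (take, skip) pairs
def pvLoopA : List (Int × Int) → List Char × List Char → List Char × List Char
  | [], st => st
  | (t, s) :: ps, (acc, rest) => pvLoopA ps (acc ++ rest.take t.toNat, rest.drop (t + s).toNat)

lemma pvFoldA (tl : List Int) : ∀ (sl : List Int), tl.length = sl.length →
    ∀ (st : List Char × List Char),
    (List.range tl.length).foldl
      (fun (st : List Char × List Char) index =>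
        (st.1 ++ st.2.take (tl.getD index 0).toNat,
         st.2.drop ((tl.getD index 0) + (sl.getD index 0)).toNat)) st
    = pvLoopA (tl.zip sl) st := by
  induction tl with
  | nil => intro sl h st; simp [pvLoopA]
  | cons t tl' ih =>
    intro sl h st
    cases sl with
    | nil => simp at h
    | cons s sl' =>
      simp only [List.length_cons] at h
      simp only [List.length_cons, List.range_succ_eq_map, List.foldl_cons, List.foldl_map,
        List.getD_cons_zero, List.getD_cons_succ, Nat.succ_eq_add_one, List.zip_cons_cons]
      obtain ⟨acc, rest⟩ := st
      rw [pvLoopA]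
      exact ih sl' (by omega) _

-- A's pair loop with the advancing-pointer view equals B's recursion
lemma pvLoop_goB (l : List Int) : ∀ (acc letters : List Char) (pos : Nat),
    (pvLoopA ((pvEvens l).zip (pvOdds l)) (acc, letters.drop pos)).1
      = acc ++ (pvGoB letters l pos).flatten := by
  induction l using pvEvens.induct with
  | case1 => intro acc letters pos; simp [pvEvens, pvOdds, pvGoB, pvLoopA]
  | case2 a => intro acc letters pos; simp [pvEvens, pvOdds, pvGoB, pvLoopA]
  | case3 t s r ih =>
    intro acc letters pos
    simp only [pvEvens, pvOdds, List.zip_cons_cons, pvLoopA, pvGoB, List.flatten_cons]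
    rw [List.drop_drop, ih]
    simp [List.append_assoc]

-- ===== VERDICT (by name: the statement is the Claim_ definition above) =====
theorem take_skip_spec : Claim_equal_take_skip := by
  intro str _ hpre
  unfold Spec_take_skip
  simp only [take_skip, take_skip_alt]
  rw [pvEvens_eq, pvOdds_eq]
  have hlen : ((str.toList.filter Char.isDigit).map pvDigitVal).length % 2 = 0 := by
    simpa using hpre
  rw [pvFoldA _ _ (pvLen_eq _ hlen)]
  have h := pvLoop_goB ((str.toList.filter Char.isDigit).map pvDigitVal) []
    (str.toList.filter (fun c => !c.isDigit)) 0
  simp only [List.drop_zero, List.nil_append] at h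
  rw [h]
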